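-- pv_equiv track=rewrite | github.com/windinghuo-hash/word2md | renderers/md_renderer.py | _render_table_gfm
-- ===== SOURCE A (Python) =====
-- def _render_table_gfm(rows, has_header: bool, use_br: bool = False) -> str:
--     """渲染为 GFM 表格"""
--     col_count = max(len(row) for row in rows)
--     col_widths = [3] * col_count
--     for row in rows:
--         for i, cell in enumerate(row):
--             display = cell.replace('\n', '<br>') if use_br else cell.replace('\n', ' ')
--             col_widths[i] = max(col_widths[i], len(display.strip()))
--
--     def fmt_row(row):
--         cells = []
--         for i in range(col_count):
--             if i < len(row):
--                 if use_br:
--                     cell_text = row[i].replace('\n', '<br>').strip()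
--                 else:
--                     cell_text = row[i].replace('\n', ' ').strip()
--             else:
--                 cell_text = ""
--             cells.append(cell_text.ljust(col_widths[i]))
--         return "| " + " | ".join(cells) + " |"
--
--     lines = [fmt_row(rows[0])]
--     lines.append("| " + " | ".join("-" * col_widths[i] for i in range(col_count)) + " |")
--     for row in rows[1:]:
--         lines.append(fmt_row(row))
--     return "\n".join(lines) + "\n\n"
-- ===== SOURCE B (Python) =====
-- def _render_table_gfm(rows, has_header: bool, use_br: bool = False) -> str:
--     """Render rows as a GFM table, assembled COLUMN-MAJOR: build each padded
--     column (with its dash cell inserted at line position 1), then read the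
--     lines across the columns."""
--     col_count = max(len(row) for row in rows)
--     sep = '<br>' if use_br else ' '
--     columns = []
--     for j in range(col_count):
--         col = [(r[j].replace('\n', sep).strip() if j < len(r) else '') for r in rows]
--         w = max(3, max(len(c) for c in col))
--         padded = [c.ljust(w) for c in col]
--         padded.insert(1, '-' * w)
--         columns.append(padded)
--     return '\n'.join('| ' + ' | '.join(col[k] for col in columns) + ' |'
--                      for k in range(len(rows) + 1)) + '\n\n'
-- ===== Notes on version B (the rewrite author's own statement) =====
-- stated objective: alternative
-- what changed: A works row-major in two stages (a mutable col_widths loop, then re-normalizing every cell again while formatting each line); B works column-major: it builds each finished column as a list of padded cells with the dash cell inserted at line position 1, then emits the output by reading line k across the columns.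
import Mathlib
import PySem

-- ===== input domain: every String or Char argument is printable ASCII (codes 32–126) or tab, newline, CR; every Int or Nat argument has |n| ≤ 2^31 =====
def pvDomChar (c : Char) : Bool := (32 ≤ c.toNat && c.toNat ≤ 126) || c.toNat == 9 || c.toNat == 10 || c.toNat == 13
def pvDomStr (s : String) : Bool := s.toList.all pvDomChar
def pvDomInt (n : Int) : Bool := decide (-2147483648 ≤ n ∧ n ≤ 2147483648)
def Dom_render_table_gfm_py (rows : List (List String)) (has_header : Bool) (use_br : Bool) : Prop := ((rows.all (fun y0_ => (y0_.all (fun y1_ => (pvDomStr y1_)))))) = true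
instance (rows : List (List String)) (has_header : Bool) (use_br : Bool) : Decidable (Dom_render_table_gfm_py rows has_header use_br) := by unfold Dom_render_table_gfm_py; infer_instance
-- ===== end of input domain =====

-- B assembles the table COLUMN-MAJOR: it builds each padded column (with its dash cell
-- inserted at line position 1) and reads the lines across the columns (objective: alternative).
-- len(s) (Python str length = code-point count)
def pvLen (s : String) : Nat := s.toList.length

-- str.ljust(w) (shared Python built-in; exact: pad with spaces to width w)
def pvLjust (s : String) (w : Nat) : String :=
  s ++ String.ofList (List.replicate (w - pvLen s) ' ')

-- ===== PORT A =====
-- display = cell.replace('\n','<br>') if use_br else cell.replace('\n',' ')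
def pvCellA (use_br : Bool) (cell : String) : String :=
  if use_br then PySem.Str.replace cell "\n" "<br>" else PySem.Str.replace cell "\n" " "

-- the col_widths loop: for row in rows: for i, cell in enumerate(row): col_widths[i] = max(...)
def pvWidthsA (use_br : Bool) (rows : List (List String)) (cc : Nat) : List Nat :=
  rows.foldl
    (fun ws row =>
      (PySem.List.enumerate row 0).foldl
        (fun ws p =>
          ws.set p.1.toNat
            (max (ws.getD p.1.toNat 0) (pvLen (PySem.Str.strip (pvCellA use_br p.2)))))
        ws)
    (List.replicate cc 3)

-- fmt_row (the 'if i < len(row)' guard is A's; row.getD i "" is row[i], only read under the guard)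
def pvFmtRowA (use_br : Bool) (cc : Nat) (ws : List Nat) (row : List String) : String :=
  "| " ++ PySem.Str.join " | "
      ((List.range cc).map (fun i =>
        pvLjust (if i < row.length then PySem.Str.strip (pvCellA use_br (row.getD i "")) else "")
          (ws.getD i 0))) ++ " |"

-- the lines of A, built from rows[0], the dashes, rows[1:]
def pvRenderA (use_br : Bool) (rows : List (List String)) (cc : Nat) : String :=
  let ws := pvWidthsA use_br rows cc
  PySem.Str.join "\n"
    (pvFmtRowA use_br cc ws (rows.getD 0 []) ::
     ("| " ++ PySem.Str.join " | "
        ((List.range cc).map (fun i => String.ofList (List.replicate (ws.getD i 0) '-'))) ++ " |") ::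
     (rows.drop 1).map (pvFmtRowA use_br cc ws)) ++ "\n\n"

def render_table_gfm_py (rows : List (List String)) (has_header : Bool) (use_br : Bool) : String :=
  match PySem.List.max? (rows.map List.length) (fun x => x) with
  | none => ""   -- Python: max() of empty raises ValueError; excluded by Pre_
  | some cc => pvRenderA use_br rows cc

-- ===== PORT B =====
-- r[j].replace('\n', sep).strip() if j < len(r) else ''
def pvNormB (sep : String) (c : String) : String :=
  PySem.Str.strip (PySem.Str.replace c "\n" sep)

-- col = [(r[j].replace('\n', sep).strip() if j < len(r) else '') for r in rows]
def pvColB (sep : String) (rows : List (List String)) (j : Nat) : List String :=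
  rows.map (fun r => if j < r.length then pvNormB sep (r.getD j "") else "")

-- w = max(3, max(len(c) for c in col)); col is nonempty under Pre_, so foldl max 0 is that max
def pvWColB (sep : String) (rows : List (List String)) (j : Nat) : Nat :=
  max 3 (((pvColB sep rows j).map pvLen).foldl max 0)

-- one finished column: pad every cell to this column's width, insert the dash cell at position 1
def pvPadColB (sep : String) (rows : List (List String)) (j : Nat) : List String :=
  PySem.List.insert
    ((pvColB sep rows j).map (fun c => pvLjust c (pvWColB sep rows j))) 1
    (String.ofList (List.replicate (pvWColB sep rows j) '-'))

-- '\n'.join('| ' + ' | '.join(col[k] for col in columns) + ' |' for k in range(len(rows)+1)) + '\n\n'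
-- (col[k] is always in range: every column has length len(rows)+1; getD is exact there)
def pvRenderB (use_br : Bool) (rows : List (List String)) (cc : Nat) : String :=
  PySem.Str.join "\n"
    ((List.range (rows.length + 1)).map
      (fun k => "| " ++ PySem.Str.join " | "
        (((List.range cc).map (pvPadColB (if use_br then "<br>" else " ") rows)).map
          (fun col => col.getD k "")) ++ " |"))
  ++ "\n\n"

def render_table_gfm_py_alt (rows : List (List String)) (has_header : Bool) (use_br : Bool) : String :=
  match PySem.List.max? (rows.map List.length) (fun x => x) with
  | none => ""   -- Python: max() of empty raises ValueError; excluded by Pre_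
  | some cc => pvRenderB use_br rows cc

-- ===== PRECONDITION & SPEC =====
-- Pre_ excludes exactly rows = [], on which Python A raises ValueError (max() of an empty sequence).
def Pre_render_table_gfm_py (rows : List (List String)) (has_header : Bool) (use_br : Bool) : Prop :=
  rows ≠ []
instance (rows : List (List String)) (has_header : Bool) (use_br : Bool) : Decidable (Pre_render_table_gfm_py rows has_header use_br) := by unfold Pre_render_table_gfm_py; infer_instance

def pvWitness_render_table_gfm_py : List (List String) × Bool × Bool :=
  ([["a", "bb"], ["c"]], true, false)

def Spec_render_table_gfm_py (rows : List (List String)) (has_header : Bool) (use_br : Bool) (out : String) : Prop := out = render_table_gfm_py_alt rows has_header use_br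
instance (rows : List (List String)) (has_header : Bool) (use_br : Bool) (out : String) : Decidable (Spec_render_table_gfm_py rows has_header use_br out) := by unfold Spec_render_table_gfm_py; infer_instance

-- ===== CLAIM (what is proved, stated in full; the proofs are below) =====
def Claim_equal_render_table_gfm_py : Prop := ∀ (rows : List (List String)) (has_header : Bool) (use_br : Bool), Dom_render_table_gfm_py rows has_header use_br → Pre_render_table_gfm_py rows has_header use_br → Spec_render_table_gfm_py rows has_header use_br (render_table_gfm_py rows has_header use_br)

-- ===== LEMMAS AND PROOFS =====

-- the cell-width key A maintains
def pvF (use_br : Bool) (c : String) : Nat := pvLen (PySem.Str.strip (pvCellA use_br c))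

-- the cell A shows at column j of a row
def pvCellAt (use_br : Bool) (j : Nat) (row : List String) : String :=
  if j < row.length then PySem.Str.strip (pvCellA use_br (row.getD j "")) else ""

-- the two cell normalizations agree
theorem pvNorm_eq (use_br : Bool) (c : String) :
    pvNormB (if use_br then "<br>" else " ") c = PySem.Str.strip (pvCellA use_br c) := by
  cases use_br <;> simp [pvNormB, pvCellA]

theorem pvColB_cell (use_br : Bool) (j : Nat) (row : List String) :
    (if j < row.length then pvNormB (if use_br then "<br>" else " ") (row.getD j "") else "")
      = pvCellAt use_br j row := by
  unfold pvCellAt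
  by_cases h : j < row.length
  · rw [if_pos h, if_pos h, pvNorm_eq]
  · rw [if_neg h, if_neg h]

theorem getD_set_nat (ws : List Nat) (k i v : Nat) :
    (ws.set k v).getD i 0 = if k = i ∧ k < ws.length then v else ws.getD i 0 := by
  simp only [List.getD, List.getElem?_set]
  by_cases h1 : k = i
  · by_cases h2 : k < ws.length
    · subst h1; simp [h2]
    · subst h1; simp [h2]
  · simp [h1]

-- A's inner width loop, characterized pointwise
theorem pvWidthsA_inner (use_br : Bool) (row : List String) :
    ∀ (k : Nat) (ws : List Nat), k + row.length ≤ ws.length →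
    (((PySem.List.enumerate row (k : Int)).foldl
        (fun ws p => ws.set p.1.toNat (max (ws.getD p.1.toNat 0) (pvF use_br p.2))) ws).length = ws.length ∧
     ∀ i : Nat,
      ((PySem.List.enumerate row (k : Int)).foldl
        (fun ws p => ws.set p.1.toNat (max (ws.getD p.1.toNat 0) (pvF use_br p.2))) ws).getD i 0 =
        if k ≤ i ∧ i < k + row.length then max (ws.getD i 0) (pvF use_br (row.getD (i - k) ""))
        else ws.getD i 0) := by
  induction row with
  | nil =>
    intro k ws _
    rw [PySem.List.enumerate_nil]
    simp only [List.foldl_nil, List.length_nil, Nat.add_zero]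
    exact ⟨trivial, fun i => by rw [if_neg (by omega)]⟩
  | cons x xs ih =>
    intro k ws hlen
    have hlc : (x :: xs).length = xs.length + 1 := by simp
    rw [PySem.List.enumerate_cons]
    have hcast : (k : Int) + 1 = ((k + 1 : Nat) : Int) := by push_cast; ring
    rw [hcast]
    simp only [List.foldl_cons, Int.toNat_natCast]
    have hkws : k < ws.length := by omega
    obtain ⟨ihlen, ihget⟩ := ih (k + 1)
      (ws.set k (max (ws.getD k 0) (pvF use_br x)))
      (by rw [List.length_set]; omega)
    refine ⟨by rw [ihlen, List.length_set], fun i => ?_⟩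
    rw [ihget i, getD_set_nat]
    by_cases h1 : k + 1 ≤ i ∧ i < (k + 1) + xs.length
    · have hik : ¬ (k = i ∧ k < ws.length) := by omega
      have hsub : (x :: xs).getD (i - k) "" = xs.getD (i - (k + 1)) "" := by
        have h3 : (i - k) = (i - (k + 1)) + 1 := by omega
        rw [h3, List.getD_cons_succ]
      rw [if_pos h1, if_neg hik, if_pos (by rw [hlc]; omega), hsub]
    · by_cases h2 : i = k
      · subst h2
        rw [if_neg h1, if_pos ⟨rfl, hkws⟩, if_pos (by rw [hlc]; omega)]
        simp
      · have hik : ¬ (k = i ∧ k < ws.length) := by omega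
        rw [if_neg h1, if_neg hik, if_neg (by rw [hlc]; omega)]

-- A's outer width loop, characterized pointwise
theorem pvWidthsA_outer (use_br : Bool) :
    ∀ (rows : List (List String)) (ws : List Nat), (∀ row ∈ rows, row.length ≤ ws.length) →
    ((rows.foldl
        (fun ws row =>
          (PySem.List.enumerate row 0).foldl
            (fun ws p => ws.set p.1.toNat (max (ws.getD p.1.toNat 0) (pvF use_br p.2))) ws) ws).length
        = ws.length ∧
     ∀ i : Nat,
      (rows.foldl
        (fun ws row =>
          (PySem.List.enumerate row 0).foldl
            (fun ws p => ws.set p.1.toNat (max (ws.getD p.1.toNat 0) (pvF use_br p.2))) ws) ws).getD i 0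
        = rows.foldl
            (fun m row => if i < row.length then max m (pvF use_br (row.getD i "")) else m)
            (ws.getD i 0)) := by
  intro rows
  induction rows with
  | nil => intro ws _; exact ⟨rfl, fun _ => rfl⟩
  | cons r rs ih =>
    intro ws hle
    simp only [List.foldl_cons]
    have hr := pvWidthsA_inner use_br r 0 ws
      (by simpa using hle r (List.mem_cons_self ..))
    rw [Nat.cast_zero] at hr
    obtain ⟨hrlen, hrget⟩ := hr
    obtain ⟨ihlen, ihget⟩ := ih _ (by
      intro row hrow; rw [hrlen]; exact hle row (List.mem_cons_of_mem _ hrow))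
    refine ⟨by rw [ihlen, hrlen], fun i => ?_⟩
    rw [ihget i, hrget i]
    simp only [Nat.zero_add, Nat.zero_le, true_and, Nat.sub_zero]

-- foldl max over Nat splits off its seed
theorem foldl_max_seed (l : List Nat) : ∀ a : Nat, l.foldl max a = max a (l.foldl max 0) := by
  induction l with
  | nil => intro a; simp
  | cons x t ih =>
    intro a
    simp only [List.foldl_cons]
    rw [ih (max a x), ih (max 0 x)]
    simp [Nat.max_comm, Nat.max_assoc, Nat.max_left_comm]

-- B's column width equals A's col_widths entry
theorem pvWidthB_eq (use_br : Bool) (rows : List (List String)) (cc : Nat) (j : Nat)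
    (hj : j < cc) (hle : ∀ row ∈ rows, row.length ≤ cc) :
    pvWColB (if use_br then "<br>" else " ") rows j
      = (pvWidthsA use_br rows cc).getD j 0 := by
  obtain ⟨_, hget⟩ := pvWidthsA_outer use_br rows (List.replicate cc 3)
    (by intro row hr; simpa using hle row hr)
  simp only [pvF] at hget
  show _ = (pvWidthsA use_br rows cc).getD j 0
  unfold pvWidthsA pvWColB
  rw [hget j]
  have h3 : (List.replicate cc 3).getD j 0 = 3 := by simp [List.getD, hj]
  rw [h3]
  have hstep : rows.foldl
      (fun m row => if j < row.length
        then max m (pvLen (PySem.Str.strip (pvCellA use_br (row.getD j "")))) else m) 3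
      = rows.foldl (fun m row => max m (pvLen (pvCellAt use_br j row))) 3 := by
    apply List.foldl_ext
    intro m row _
    unfold pvCellAt
    by_cases h : j < row.length <;> simp [h, pvLen]
  rw [hstep]
  have hcol : (pvColB (if use_br then "<br>" else " ") rows j).map pvLen
      = rows.map (fun row => pvLen (pvCellAt use_br j row)) := by
    unfold pvColB
    rw [List.map_map]
    apply List.map_congr_left
    intro row _
    simp only [pvColB_cell]; rfl
  have hswap : rows.foldl (fun m row => max m (pvLen (pvCellAt use_br j row))) 3
      = (rows.map (fun row => pvLen (pvCellAt use_br j row))).foldl max 3 := by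
    rw [List.foldl_map]
  rw [hcol, hswap, foldl_max_seed _ 3]

-- the finished column, written out for a nonempty row list
set_option maxHeartbeats 1000000 in
theorem pvPadColB_explicit (use_br : Bool) (r : List String) (rs : List (List String)) (j w : Nat)
    (hw : w = pvWColB (if use_br then "<br>" else " ") (r :: rs) j) :
    pvPadColB (if use_br then "<br>" else " ") (r :: rs) j
      = pvLjust (pvCellAt use_br j r) w
        :: String.ofList (List.replicate w '-')
        :: rs.map (fun r' => pvLjust (pvCellAt use_br j r') w) := by
  unfold pvPadColB
  rw [← hw]
  have hcol : pvColB (if use_br then "<br>" else " ") (r :: rs) j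
      = pvCellAt use_br j r :: rs.map (pvCellAt use_br j) := by
    unfold pvColB
    simp only [List.map_cons, pvColB_cell]
  rw [hcol]
  simp only [List.map_cons, List.map_map]
  rw [PySem.List.insert_ofNat _ _ _ (by simp)]
  simp [Function.comp_def]

-- the two renderings produce the same lines
set_option maxHeartbeats 1000000 in
theorem pvRender_eq (use_br : Bool) (rows : List (List String)) (cc : Nat)
    (hne : rows ≠ []) (hle : ∀ row ∈ rows, row.length ≤ cc) :
    pvRenderA use_br rows cc = pvRenderB use_br rows cc := by
  obtain ⟨r, rs, rfl⟩ := List.exists_cons_of_ne_nil hne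
  have hpad : ∀ j, j < cc → pvPadColB (if use_br then "<br>" else " ") (r :: rs) j
      = pvLjust (pvCellAt use_br j r) ((pvWidthsA use_br (r :: rs) cc).getD j 0)
        :: String.ofList (List.replicate ((pvWidthsA use_br (r :: rs) cc).getD j 0) '-')
        :: rs.map (fun r' => pvLjust (pvCellAt use_br j r')
             ((pvWidthsA use_br (r :: rs) cc).getD j 0)) := by
    intro j hj
    rw [pvPadColB_explicit use_br r rs j ((pvWidthsA use_br (r :: rs) cc).getD j 0)
      (pvWidthB_eq use_br (r :: rs) cc j hj hle).symm]
  have hlines :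
      (pvFmtRowA use_br cc (pvWidthsA use_br (r :: rs) cc) r ::
        ("| " ++ PySem.Str.join " | "
          ((List.range cc).map (fun i =>
            String.ofList (List.replicate ((pvWidthsA use_br (r :: rs) cc).getD i 0) '-'))) ++ " |") ::
        rs.map (pvFmtRowA use_br cc (pvWidthsA use_br (r :: rs) cc)))
      = (List.range ((r :: rs).length + 1)).map
          (fun k => "| " ++ PySem.Str.join " | "
            (((List.range cc).map (pvPadColB (if use_br then "<br>" else " ") (r :: rs))).map
              (fun col => col.getD k "")) ++ " |") := by
    apply List.ext_getElem
    · simp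
    · intro k h1 h2
      have hk : k < rs.length + 2 := by simp at h1; omega
      simp only [List.getElem_map, List.getElem_range, List.map_map]
      match k, hk with
      | 0, _ =>
        show pvFmtRowA use_br cc (pvWidthsA use_br (r :: rs) cc) r = _
        unfold pvFmtRowA
        refine congrArg (fun cells => "| " ++ PySem.Str.join " | " cells ++ " |") ?_
        apply List.map_congr_left
        intro j hj
        rw [Function.comp_apply, hpad j (List.mem_range.mp hj)]
        rfl
      | 1, _ =>
        show ("| " ++ PySem.Str.join " | "
          ((List.range cc).map (fun i =>
            String.ofList (List.replicate ((pvWidthsA use_br (r :: rs) cc).getD i 0) '-'))) ++ " |") = _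
        refine congrArg (fun cells => "| " ++ PySem.Str.join " | " cells ++ " |") ?_
        apply List.map_congr_left
        intro j hj
        rw [Function.comp_apply, hpad j (List.mem_range.mp hj)]
        rfl
      | (k' + 2), hk =>
        have hk' : k' < rs.length := by omega
        show (rs.map (pvFmtRowA use_br cc (pvWidthsA use_br (r :: rs) cc)))[k']'(by simpa using hk') = _
        simp only [List.getElem_map]
        unfold pvFmtRowA
        refine congrArg (fun cells => "| " ++ PySem.Str.join " | " cells ++ " |") ?_
        apply List.map_congr_left
        intro j hj
        rw [Function.comp_apply, hpad j (List.mem_range.mp hj)]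
        show pvLjust (pvCellAt use_br j rs[k']) ((pvWidthsA use_br (r :: rs) cc).getD j 0)
          = (rs.map (fun r' => pvLjust (pvCellAt use_br j r')
              ((pvWidthsA use_br (r :: rs) cc).getD j 0))).getD k' ""
        rw [List.getD_eq_getElem (rs.map (fun r' => pvLjust (pvCellAt use_br j r')
              ((pvWidthsA use_br (r :: rs) cc).getD j 0))) "" (by simpa using hk')]
        simp
  unfold pvRenderA pvRenderB
  show PySem.Str.join "\n"
      (pvFmtRowA use_br cc (pvWidthsA use_br (r :: rs) cc) r ::
        ("| " ++ PySem.Str.join " | "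
          ((List.range cc).map (fun i =>
            String.ofList (List.replicate ((pvWidthsA use_br (r :: rs) cc).getD i 0) '-'))) ++ " |") ::
        rs.map (pvFmtRowA use_br cc (pvWidthsA use_br (r :: rs) cc))) ++ "\n\n"
    = _
  rw [hlines]

-- ===== VERDICT (by name: the statement is the Claim_ definition above) =====
theorem render_table_gfm_py_spec : Claim_equal_render_table_gfm_py := by
  intro rows has_header use_br _ hpre
  unfold Pre_render_table_gfm_py at hpre
  unfold Spec_render_table_gfm_py render_table_gfm_py render_table_gfm_py_alt
  cases hm : PySem.List.max? (rows.map List.length) (fun x => x) with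
  | none =>
    exact absurd (by simpa using (PySem.List.max?_eq_none_iff _ _).mp hm) hpre
  | some cc =>
    have hle : ∀ row ∈ rows, row.length ≤ cc := by
      intro row hr
      exact PySem.List.max?_isMax hm _ (List.mem_map_of_mem hr)
    exact pvRender_eq use_br rows cc hpre hle
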